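-- pv_equiv track=rewrite | github.com/stefanos50/least-mean-squares-algorithm | LMS.py | LMS_X_Y
-- ===== SOURCE A (Python) =====
-- def LMS_X_Y(data, labels):
--     x_array_home = []
--     x_array_away = []
--     x_array_draw = []
--     y_array_home = []
--     y_array_away = []
--     y_array_draw = []
--     for i in range(len(data)):
--         if labels[i] is 'H':
--             x_array_home.append(data[i])
--             y_array_home.append([1, 0, 0])
--         elif labels[i] is 'D':
--             x_array_draw.append(data[i])
--             y_array_draw.append([0, 1, 0])
--         else:
--             x_array_away.append(data[i])
--             y_array_away.append([0, 0, 1])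
--     return x_array_home+x_array_draw+x_array_away, y_array_home+y_array_draw+y_array_away
-- ===== SOURCE B (Python) =====
-- def LMS_X_Y(data, labels):
--     x_home = [data[i] for i in range(len(data)) if labels[i] is 'H']
--     x_draw = [data[i] for i in range(len(data)) if labels[i] is 'D']
--     x_away = [data[i] for i in range(len(data))
--               if labels[i] is not 'H' and labels[i] is not 'D']
--     y = ([[1, 0, 0] for _ in x_home]
--          + [[0, 1, 0] for _ in x_draw]
--          + [[0, 0, 1] for _ in x_away])
--     return x_home + x_draw + x_away, y
-- ===== Notes on version B (the rewrite author's own statement) =====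
-- stated objective: idiomatic
-- what changed: A's single partitioning loop with six growing accumulator lists is replaced by three independent list comprehensions over the index range plus constant-row maps for the labels, concatenated at the end.
import Mathlib
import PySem

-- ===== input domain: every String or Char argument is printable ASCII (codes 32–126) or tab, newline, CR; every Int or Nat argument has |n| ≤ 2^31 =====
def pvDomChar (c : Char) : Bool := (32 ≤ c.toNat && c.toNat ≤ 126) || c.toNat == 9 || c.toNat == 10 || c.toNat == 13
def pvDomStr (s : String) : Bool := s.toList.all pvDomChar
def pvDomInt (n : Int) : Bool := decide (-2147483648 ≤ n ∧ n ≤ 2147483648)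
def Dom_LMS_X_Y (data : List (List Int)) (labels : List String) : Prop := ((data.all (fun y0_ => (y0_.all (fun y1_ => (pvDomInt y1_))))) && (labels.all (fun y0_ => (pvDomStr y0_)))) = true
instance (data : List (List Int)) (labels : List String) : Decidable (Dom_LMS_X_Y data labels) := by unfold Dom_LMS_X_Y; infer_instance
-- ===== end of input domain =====

-- B replaces A's single partitioning loop (six accumulators) by three independent
-- comprehension scans plus constant-row maps; objective: idiomatic. Python's `is` on
-- the interned one-char literals behaves as string equality and is ported as equality.

-- ===== PORT A =====
-- one partitioning pass over range(len(data)) carrying the six accumulator lists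
def LMS_X_Y (data : List (List Int)) (labels : List String) : List (List Int) × List (List Int) :=
  let st := (PySem.List.pyRange 0 data.length 1).foldl
    (fun (s : List (List Int) × List (List Int) × List (List Int) ×
              List (List Int) × List (List Int) × List (List Int)) i =>
      let (xh, xa, xd, yh, ya, yd) := s
      let lab := (PySem.List.pyGet? labels i).getD ""
      let d := (PySem.List.pyGet? data i).getD []
      if lab = "H" then (xh ++ [d], xa, xd, yh ++ [[1,0,0]], ya, yd)
      else if lab = "D" then (xh, xa, xd ++ [d], yh, ya, yd ++ [[0,1,0]])
      else (xh, xa ++ [d], xd, yh, ya ++ [[0,0,1]], yd))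
    ([], [], [], [], [], [])
  (st.1 ++ st.2.2.1 ++ st.2.1, st.2.2.2.1 ++ st.2.2.2.2.2 ++ st.2.2.2.2.1)

-- ===== PORT B =====
-- three independent filtered scans of the index range, then constant-row maps
def LMS_X_Y_alt (data : List (List Int)) (labels : List String) : List (List Int) × List (List Int) :=
  let idx := PySem.List.pyRange 0 data.length 1
  let lab := fun (i : Int) => (PySem.List.pyGet? labels i).getD ""
  let get := fun (i : Int) => (PySem.List.pyGet? data i).getD []
  let xHome := (idx.filter (fun i => lab i = "H")).map get
  let xDraw := (idx.filter (fun i => lab i = "D")).map get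
  let xAway := (idx.filter (fun i => ¬ lab i = "H" ∧ ¬ lab i = "D")).map get
  let y := xHome.map (fun _ => ([1,0,0] : List Int))
           ++ xDraw.map (fun _ => ([0,1,0] : List Int))
           ++ xAway.map (fun _ => ([0,0,1] : List Int))
  (xHome ++ xDraw ++ xAway, y)

-- ===== PRECONDITION & SPEC =====
-- Pre_ excludes exactly the inputs where labels is shorter than data: there both
-- A and B raise IndexError on labels[i].
def Pre_LMS_X_Y (data : List (List Int)) (labels : List String) : Prop :=
  data.length ≤ labels.length
instance (data : List (List Int)) (labels : List String) : Decidable (Pre_LMS_X_Y data labels) := by unfold Pre_LMS_X_Y; infer_instance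
def pvWitness_LMS_X_Y : List (List Int) × List String := ([[1], [2], [3]], ["H", "D", "A"])

def Spec_LMS_X_Y (data : List (List Int)) (labels : List String) (out : List (List Int) × List (List Int)) : Prop := out = LMS_X_Y_alt data labels
instance (data : List (List Int)) (labels : List String) (out : List (List Int) × List (List Int)) : Decidable (Spec_LMS_X_Y data labels out) := by unfold Spec_LMS_X_Y; infer_instance

-- ===== CLAIM (what is proved, stated in full; the proofs are below) =====
def Claim_equal_LMS_X_Y : Prop := ∀ (data : List (List Int)) (labels : List String), Dom_LMS_X_Y data labels → Pre_LMS_X_Y data labels → Spec_LMS_X_Y data labels (LMS_X_Y data labels)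

-- ===== LEMMAS AND PROOFS =====

-- invariant of A's fold over an arbitrary index list, for arbitrary starting accumulators
theorem lms_fold_inv (labels : List String) (data : List (List Int)) (is : List Int)
    (xh xa xd yh ya yd : List (List Int)) :
    (is.foldl
      (fun (s : List (List Int) × List (List Int) × List (List Int) ×
                List (List Int) × List (List Int) × List (List Int)) i =>
        let (xh, xa, xd, yh, ya, yd) := s
        let lab := (PySem.List.pyGet? labels i).getD ""
        let d := (PySem.List.pyGet? data i).getD []
        if lab = "H" then (xh ++ [d], xa, xd, yh ++ [[1,0,0]], ya, yd)
        else if lab = "D" then (xh, xa, xd ++ [d], yh, ya, yd ++ [[0,1,0]])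
        else (xh, xa ++ [d], xd, yh, ya ++ [[0,0,1]], yd))
      (xh, xa, xd, yh, ya, yd)) =
    (xh ++ (is.filter (fun i => ((PySem.List.pyGet? labels i).getD "" = "H" : Bool))).map (fun i => (PySem.List.pyGet? data i).getD []),
     xa ++ (is.filter (fun i => (¬ (PySem.List.pyGet? labels i).getD "" = "H" ∧ ¬ (PySem.List.pyGet? labels i).getD "" = "D" : Bool))).map (fun i => (PySem.List.pyGet? data i).getD []),
     xd ++ (is.filter (fun i => ((PySem.List.pyGet? labels i).getD "" = "D" : Bool))).map (fun i => (PySem.List.pyGet? data i).getD []),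
     yh ++ (is.filter (fun i => ((PySem.List.pyGet? labels i).getD "" = "H" : Bool))).map (fun _ => ([1,0,0] : List Int)),
     ya ++ (is.filter (fun i => (¬ (PySem.List.pyGet? labels i).getD "" = "H" ∧ ¬ (PySem.List.pyGet? labels i).getD "" = "D" : Bool))).map (fun _ => ([0,0,1] : List Int)),
     yd ++ (is.filter (fun i => ((PySem.List.pyGet? labels i).getD "" = "D" : Bool))).map (fun _ => ([0,1,0] : List Int))) := by
  induction is generalizing xh xa xd yh ya yd with
  | nil => simp
  | cons i is ih =>
    simp only [List.foldl_cons, List.filter_cons]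
    by_cases hH : (PySem.List.pyGet? labels i).getD "" = "H"
    · simp [hH, ih, List.append_assoc]
    · by_cases hD : (PySem.List.pyGet? labels i).getD "" = "D"
      · simp [hD, ih, List.append_assoc]
      · simp [hH, hD, ih, List.append_assoc]

theorem map_const_filter {α β γ : Type} (p : α → Bool) (f : α → β) (c : γ) (is : List α) :
    ((is.filter p).map f).map (fun _ => c) = (is.filter p).map (fun _ => c) := by
  induction is.filter p with
  | nil => rfl
  | cons a t ih => simp [ih]

-- ===== VERDICT (by name: the statement is the Claim_ definition above) =====
theorem LMS_X_Y_spec : Claim_equal_LMS_X_Y := by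
  intro data labels _ _
  show _ = _
  simp only [LMS_X_Y, LMS_X_Y_alt, lms_fold_inv, List.nil_append, map_const_filter]
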